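-- pv_equiv track=rewrite | github.com/giellalt/speech-sma | sma-fastpitch/check_transcript_length.py | filter_and_find_longest_transcript
-- ===== SOURCE A (Python) =====
-- def filter_and_find_longest_transcript(table_data, threshold=4):
--     filtered_rows = []
--     longest_transcript_length = 0
--     longest_transcript = ""
--
--     for row in table_data:
--         columns = row.split('|')
--         if len(columns) == 4:  # Ensure there are exactly 4 columns in the row
--             filename, _, transcript, _ = columns
--             transcript_length = len(transcript.strip())
--             if transcript_length < threshold:
--                 filtered_rows.append((filename, transcript, transcript_length))
--             if transcript_length > longest_transcript_length:
--                 longest_transcript_length = transcript_length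
--                 longest_transcript = transcript
--
--     return filtered_rows, longest_transcript, longest_transcript_length
-- ===== SOURCE B (Python) =====
-- def filter_and_find_longest_transcript(table_data, threshold=4):
--     # Single parsing pass, then a comprehension for the filter and max() for the longest.
--     parsed = []
--     for row in table_data:
--         cols = row.split('|')
--         if len(cols) == 4:
--             parsed.append((cols[0], cols[2], len(cols[2].strip())))
--     filtered_rows = [(f, t, l) for (f, t, l) in parsed if l < threshold]
--     if parsed:
--         _, t, l = max(parsed, key=lambda x: x[2])
--         if l > 0:
--             return filtered_rows, t, l
--     return filtered_rows, "", 0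
-- ===== Notes on version B (the rewrite author's own statement) =====
-- stated objective: alternative
-- what changed: Replaces A's single accumulator loop (list append + running longest with mutable state) by a parse-once pass into (filename, transcript, length) tuples, a filtering comprehension over it, and max(parsed, key=length) with a guard reproducing the ('', 0) default when there are no valid rows or all stripped transcripts are empty.
import Mathlib
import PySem

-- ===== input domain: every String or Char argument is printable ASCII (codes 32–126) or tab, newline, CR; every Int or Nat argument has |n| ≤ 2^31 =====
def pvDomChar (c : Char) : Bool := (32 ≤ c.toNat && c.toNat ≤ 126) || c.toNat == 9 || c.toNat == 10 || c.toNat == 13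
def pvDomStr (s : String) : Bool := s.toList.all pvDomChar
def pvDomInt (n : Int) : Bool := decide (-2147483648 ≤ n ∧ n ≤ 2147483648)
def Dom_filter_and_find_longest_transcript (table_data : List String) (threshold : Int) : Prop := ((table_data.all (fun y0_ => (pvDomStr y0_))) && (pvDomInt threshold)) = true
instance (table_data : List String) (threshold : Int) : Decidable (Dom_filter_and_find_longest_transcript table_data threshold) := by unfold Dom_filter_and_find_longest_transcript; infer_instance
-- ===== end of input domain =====

-- B replaces A's single accumulating loop by a parse-once pass, a filter over the parsed
-- triples, and a guarded max-by-length selection (objective: alternative decomposition).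

-- ===== PORT A =====
-- one iteration of A's loop body (literal transliteration)
def pvStepA (threshold : Int)
    (st : (List (String × String × Int)) × String × Int) (row : String) :
    (List (String × String × Int)) × String × Int :=
  match PySem.Str.split? row "|" with
  | some [filename, _, transcript, _] =>
      let l : Int := PySem.Str.len (PySem.Str.strip transcript)
      let st1 := if l < threshold then (st.1 ++ [(filename, transcript, l)], st.2) else st
      if st1.2.2 < l then (st1.1, transcript, l) else st1
  | _ => st

def filter_and_find_longest_transcript (table_data : List String) (threshold : Int) :
    (List (String × String × Int)) × String × Int :=
  table_data.foldl (pvStepA threshold) ([], "", 0)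

-- ===== PORT B =====
-- parse one row: Some (filename, transcript, stripped length) iff it has exactly 4 columns
def pvParse (row : String) : Option (String × String × Int) :=
  match PySem.Str.split? row "|" with
  | some [f, _, t, _] => some (f, t, PySem.Str.len (PySem.Str.strip t))
  | _ => none

def filter_and_find_longest_transcript_alt (table_data : List String) (threshold : Int) :
    (List (String × String × Int)) × String × Int :=
  let parsed := table_data.filterMap pvParse
  let filtered := parsed.filter (fun x => decide (x.2.2 < threshold))
  match PySem.List.max? parsed (fun x => x.2.2) with
  | some m => if 0 < m.2.2 then (filtered, m.2.1, m.2.2) else (filtered, "", 0)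
  | none => (filtered, "", 0)

-- ===== CLAIM (what is proved, stated in full; the proofs are below) =====
def Spec_filter_and_find_longest_transcript (table_data : List String) (threshold : Int) (out : (List (String × String × Int)) × String × Int) : Prop := out = filter_and_find_longest_transcript_alt table_data threshold
instance (table_data : List String) (threshold : Int) (out : (List (String × String × Int)) × String × Int) : Decidable (Spec_filter_and_find_longest_transcript table_data threshold out) := by unfold Spec_filter_and_find_longest_transcript; infer_instance

def Claim_equal_filter_and_find_longest_transcript : Prop := ∀ (table_data : List String) (threshold : Int), Dom_filter_and_find_longest_transcript table_data threshold → Spec_filter_and_find_longest_transcript table_data threshold (filter_and_find_longest_transcript table_data threshold)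

-- ===== LEMMAS AND PROOFS =====

-- the longest-transcript update of A's loop, on (longest, longest_len) state
def pvStepL (p : String × Int) (x : String × String × Int) : String × Int :=
  if p.2 < x.2.2 then (x.2.1, x.2.2) else p

-- the fold step of PySem.List.max? specialised to our key
def pvStepM (acc : Option (String × String × Int)) (x : String × String × Int) :
    Option (String × String × Int) :=
  match acc with
  | none => some x
  | some m => if m.2.2 < x.2.2 then some x else some m

-- read a max?-state as A's (longest, length) result, masking a zero-length maximum
def pvMask (o : Option (String × String × Int)) : String × Int :=
  match o with
  | some m => if 0 < m.2.2 then (m.2.1, m.2.2) else ("", 0)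
  | none => ("", 0)

lemma pvMax_eq (ps : List (String × String × Int)) :
    PySem.List.max? ps (fun x => x.2.2) = ps.foldl pvStepM none := by
  unfold PySem.List.max?
  apply List.foldl_ext
  intro acc x _
  cases acc <;> rfl

lemma pvParse_nonneg (row : String) (x : String × String × Int)
    (h : pvParse row = some x) : 0 ≤ x.2.2 := by
  unfold pvParse at h
  split at h
  · cases h
    simp [PySem.Str.len]
  · cases h

lemma pvStepA_eq (threshold : Int) (st : (List (String × String × Int)) × String × Int)
    (row : String) :
    pvStepA threshold st row =
      match pvParse row with
      | some x => (if x.2.2 < threshold then st.1 ++ [x] else st.1, pvStepL st.2 x)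
      | none => st := by
  unfold pvStepA pvParse pvStepL
  rcases hs : PySem.Str.split? row "|" with _ | ⟨_ | ⟨f, _ | ⟨c2, _ | ⟨t, _ | ⟨c4, _ | ⟨c5, rest⟩⟩⟩⟩⟩⟩ <;>
    simp only []
  split_ifs <;> rfl

lemma pvFold_eq (threshold : Int) (rows : List String)
    (acc : List (String × String × Int)) (s : String × Int) :
    rows.foldl (pvStepA threshold) (acc, s) =
      (acc ++ (rows.filterMap pvParse).filter (fun x => decide (x.2.2 < threshold)),
       (rows.filterMap pvParse).foldl pvStepL s) := by
  induction rows generalizing acc s with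
  | nil => simp
  | cons r t ih =>
    rw [List.foldl_cons, pvStepA_eq]
    rcases hp : pvParse r with _ | x
    · simp only [List.filterMap_cons, hp]
      exact ih acc s
    · simp only [List.filterMap_cons, hp, List.filter_cons]
      by_cases hx : x.2.2 < threshold
      · simp only [hx, decide_true, if_pos, ih, List.foldl_cons]
        simp [List.append_assoc]
      · simp only [hx, decide_false, ih, List.foldl_cons]
        simp

lemma pvM_some (t : List (String × String × Int)) (m : String × String × Int) :
    ∃ m', t.foldl pvStepM (some m) = some m' ∧ m.2.2 ≤ m'.2.2 := by
  induction t generalizing m with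
  | nil => exact ⟨m, rfl, le_refl _⟩
  | cons x t ih =>
    simp only [List.foldl_cons, pvStepM]
    by_cases h : m.2.2 < x.2.2
    · simp only [if_pos h]
      obtain ⟨m', hm', hle⟩ := ih x
      exact ⟨m', hm', le_of_lt (lt_of_lt_of_le h hle)⟩
    · simp only [if_neg h]
      exact ih m

lemma pvG (ps : List (String × String × Int)) (m : String × String × Int) :
    ps.foldl pvStepL (m.2.1, m.2.2) =
      match ps.foldl pvStepM (some m) with
      | some m' => (m'.2.1, m'.2.2)
      | none => ("", 0) := by
  induction ps generalizing m with
  | nil => rfl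
  | cons x t ih =>
    simp only [List.foldl_cons, pvStepL, pvStepM]
    by_cases h : m.2.2 < x.2.2
    · simp only [if_pos h]
      exact ih x
    · simp only [if_neg h]
      exact ih m

lemma pvN (ps : List (String × String × Int)) :
    (∀ x ∈ ps, 0 ≤ x.2.2) → ∀ (x : String × String × Int), x.2.2 = 0 →
      pvMask (ps.foldl pvStepM (some x)) = pvMask (ps.foldl pvStepM none) := by
  induction ps with
  | nil =>
    intro _ x hx
    simp [pvMask, hx]
  | cons z t ih =>
    intro hnn x hx
    have hz : 0 ≤ z.2.2 := hnn z (by simp)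
    have hnt : ∀ y ∈ t, 0 ≤ y.2.2 := fun y hy => hnn y (by simp [hy])
    simp only [List.foldl_cons, pvStepM]
    by_cases h : 0 < z.2.2
    · rw [if_pos (hx ▸ h)]
    · have hz0 : z.2.2 = 0 := le_antisymm (not_lt.1 h) hz
      rw [if_neg (by omega), ih hnt x hx, ih hnt z hz0]

lemma pvH (ps : List (String × String × Int)) (hnn : ∀ x ∈ ps, 0 ≤ x.2.2) :
    ps.foldl pvStepL ("", 0) = pvMask (ps.foldl pvStepM none) := by
  induction ps with
  | nil => rfl
  | cons x t ih =>
    have hx0 : 0 ≤ x.2.2 := hnn x (by simp)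
    have hnt : ∀ y ∈ t, 0 ≤ y.2.2 := fun y hy => hnn y (by simp [hy])
    simp only [List.foldl_cons]
    by_cases h : 0 < x.2.2
    · rw [show pvStepL ("", 0) x = (x.2.1, x.2.2) from by simp [pvStepL, h], pvG]
      obtain ⟨m', hm', hle⟩ := pvM_some t x
      rw [show pvStepM none x = some x from rfl, hm']
      have hm0 : 0 < m'.2.2 := lt_of_lt_of_le h hle
      simp [pvMask, hm0]
    · have hxz : x.2.2 = 0 := le_antisymm (not_lt.1 h) hx0
      rw [show pvStepL ("", 0) x = ("", 0) from by simp [pvStepL, not_lt.1 h],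
          show pvStepM none x = some x from rfl, ih hnt]
      exact (pvN t hnt x hxz).symm

-- ===== VERDICT (by name: the statement is the Claim_ definition above) =====
theorem filter_and_find_longest_transcript_spec : Claim_equal_filter_and_find_longest_transcript := by
  intro td th _
  unfold Spec_filter_and_find_longest_transcript
  have hnn : ∀ x ∈ td.filterMap pvParse, 0 ≤ x.2.2 := by
    intro x hx
    rcases List.mem_filterMap.1 hx with ⟨r, _, hr⟩
    exact pvParse_nonneg r x hr
  simp only [filter_and_find_longest_transcript, filter_and_find_longest_transcript_alt]
  rw [pvFold_eq th td [] ("", 0), pvMax_eq, pvH (td.filterMap pvParse) hnn, List.nil_append]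
  cases ho : (td.filterMap pvParse).foldl pvStepM none with
  | none => simp [pvMask]
  | some m =>
    simp only [pvMask]
    split_ifs <;> rfl
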